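-- pv_equiv track=rewrite | github.com/haibonlp/LeaPI | leapi/data/event_info.py | get_event_words
-- ===== SOURCE A (Python) =====
-- wordMap = { "@fps@"   : "i",
--              "@fps@$"  : "my",
--              "@fpp@"   : "we",
--              "@fpp@$"  : "our",
--              "@sp@"    : "you",
--              "@sp@$"   : "your",
--              "@tpm@"   : "he",
--              "@tpm@$"  : "his",
--              "@tpf@"   : "she",
--              "@tpf@$"  : "her",
--              "@tpp@"   : "they",
--              "@tpp@$"  : "their"
--      }
--
-- def get_event_words(evtup):
--   terms = evtup.split('===')
--   words = []
--   for t in terms: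
--     t = t.strip()
--     itemlist = t.split()
--     for item in itemlist:
--       item = item.strip()
--       wlist = item.split('_')
--       for w in wlist:
--         w = w.strip()
--         if w in wordMap:
--             w = wordMap[w]
--         if len(w) > 0:
--           words.append(w)
--   #print 'evtup : ', evtup, words
--   return words
-- ===== SOURCE B (Python) =====
-- wordMap = { "@fps@"   : "i",
--              "@fps@$"  : "my",
--              "@fpp@"   : "we",
--              "@fpp@$"  : "our",
--              "@sp@"    : "you",
--              "@sp@$"   : "your",
--              "@tpm@"   : "he",
--              "@tpm@$"  : "his",
--              "@tpf@"   : "she",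
--              "@tpf@$"  : "her",
--              "@tpp@"   : "they",
--              "@tpp@$"  : "their"
--      }
--
-- def get_event_words(evtup):
--   # normalize both delimiters to a space, tokenize once, then map placeholders
--   tokens = evtup.replace('===', ' ').replace('_', ' ').split()
--   return [wordMap.get(tok, tok) for tok in tokens]
-- ===== Notes on version B (the rewrite author's own statement) =====
-- stated objective: simpler
-- what changed: A's three nested delimiter-by-delimiter split loops (triple-equals, then whitespace, then underscore, with per-piece strips and an append accumulator) are collapsed into one normalize-then-tokenize pass: both extra delimiters are replaced by spaces, the string is split once on whitespace, and each token is mapped through wordMap in a single comprehension.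
import Mathlib
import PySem

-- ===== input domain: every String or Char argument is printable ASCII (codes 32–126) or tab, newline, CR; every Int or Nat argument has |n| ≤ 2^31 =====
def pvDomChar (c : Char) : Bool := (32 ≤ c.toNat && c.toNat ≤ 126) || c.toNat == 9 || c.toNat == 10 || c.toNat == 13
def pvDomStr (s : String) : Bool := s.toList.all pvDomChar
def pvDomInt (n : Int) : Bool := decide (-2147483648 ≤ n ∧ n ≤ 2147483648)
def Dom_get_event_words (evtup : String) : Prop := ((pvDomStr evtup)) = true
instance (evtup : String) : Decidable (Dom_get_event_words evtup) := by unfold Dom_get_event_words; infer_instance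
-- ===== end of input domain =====

-- B replaces A's three nested delimiter-by-delimiter loops by one normalize-then-tokenize pass
-- (replace '===' and '_' by spaces, split once on whitespace, map placeholders); objective: simpler.

-- module-level wordMap shared by both sources
def pvWordMap : PySem.Dict String String :=
  PySem.Dict.ofList [("@fps@","i"),("@fps@$","my"),("@fpp@","we"),("@fpp@$","our"),
    ("@sp@","you"),("@sp@$","your"),("@tpm@","he"),("@tpm@$","his"),
    ("@tpf@","she"),("@tpf@$","her"),("@tpp@","they"),("@tpp@$","their")]

-- ===== PORT A =====
def get_event_words (evtup : String) : List String :=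
  let terms := PySem.Chars.splitOn evtup.toList ['=','=','=']
  terms.foldl (fun words t =>
    let t1 := PySem.Chars.strip t
    let itemlist := PySem.Chars.split₀ t1
    itemlist.foldl (fun words item =>
      let item1 := PySem.Chars.strip item
      let wlist := PySem.Chars.splitOn item1 ['_']
      wlist.foldl (fun words w =>
        let w1 := PySem.Chars.strip w
        -- 'if w in wordMap: w = wordMap[w]' ported as one lookup
        let w2 : String := match pvWordMap.get? (String.ofList w1) with
          | some v => v
          | none => String.ofList w1
        if 0 < PySem.Str.len w2 then words ++ [w2] else words) words) words) []

-- ===== PORT B =====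
def get_event_words_alt (evtup : String) : List String :=
  let tokens := PySem.Chars.split₀
    (PySem.Chars.replace (PySem.Chars.replace evtup.toList ['=','=','='] [' ']) ['_'] [' '])
  tokens.map (fun tok => (pvWordMap.get? (String.ofList tok)).getD (String.ofList tok))

-- ===== PRECONDITION & SPEC =====
def Spec_get_event_words (evtup : String) (out : List String) : Prop := out = get_event_words_alt evtup
instance (evtup : String) (out : List String) : Decidable (Spec_get_event_words evtup out) := by unfold Spec_get_event_words; infer_instance

-- ===== CLAIM (what is proved, stated in full; the proofs are below) =====
def Claim_equal_get_event_words : Prop := ∀ (evtup : String), Dom_get_event_words evtup → Spec_get_event_words evtup (get_event_words evtup)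

-- ===== LEMMAS AND PROOFS =====

-- the combined delimiter class and the '_' → ' ' normalization map
def pvP (c : Char) : Bool := PySem.Chars.isspace c || c == '_'
def pvF (c : Char) : Char := if c == '_' then ' ' else c
-- tokens of a string: split on the combined class, drop empty pieces
def pvTok (s : List Char) : List (List Char) := (List.splitOnP pvP s).filter (fun l => !l.isEmpty)
-- the wordMap lookup applied to one token
def pvLk (w : List Char) : String := (pvWordMap.get? (String.ofList w)).getD (String.ofList w)

-- structural model of Python's str.split(sep) scan (leftmost, non-overlapping)
def pvSplitOnF (sep : List Char) : List Char → List (List Char)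
  | [] => [[]]
  | c :: rest =>
    if sep.isPrefixOf (c :: rest) then [] :: pvSplitOnF sep (rest.drop (sep.length - 1))
    else (pvSplitOnF sep rest).modifyHead (c :: ·)
  termination_by l => l.length
  decreasing_by
  · simp only [List.length_cons]
    have := List.length_drop (l := rest) (i := sep.length - 1)
    omega
  · simp

lemma pvSplitOnF_ne_nil (sep l) : pvSplitOnF sep l ≠ [] := by
  induction l using pvSplitOnF.induct sep with
  | case1 => simp [pvSplitOnF]
  | case2 c rest hpre ih => simp [pvSplitOnF, hpre]
  | case3 c rest hpre ih =>
    rw [pvSplitOnF, if_neg hpre]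
    cases h : pvSplitOnF sep rest with
    | nil => exact absurd h ih
    | cons a b => simp

-- generic splitOnP facts ------------------------------------------------------

lemma pv_mem_splitOnP {p : Char → Bool} {x piece : List Char} {c : Char}
    (hp : piece ∈ List.splitOnP p x) (hc : c ∈ piece) : p c = false ∧ c ∈ x := by
  induction x generalizing piece with
  | nil =>
    simp [List.splitOnP_nil] at hp
    subst hp; simp at hc
  | cons a as ih =>
    rw [List.splitOnP_cons] at hp
    by_cases ha : p a
    · simp [ha] at hp
      rcases hp with h | h
      · subst h; simp at hc
      · obtain ⟨h1, h2⟩ := ih h hc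
        exact ⟨h1, by simp [h2]⟩
    · simp only [ha, Bool.false_eq_true, if_false] at hp
      obtain ⟨h, t, ht⟩ := List.exists_cons_of_ne_nil (List.splitOnP_ne_nil p as)
      rw [ht] at hp
      simp only [List.modifyHead_cons, List.mem_cons] at hp
      rcases hp with rfl | hmem
      · rcases List.mem_cons.1 hc with rfl | hch
        · exact ⟨by simpa using ha, by simp⟩
        · obtain ⟨h1, h2⟩ := ih (piece := h) (by rw [ht]; simp) hch
          exact ⟨h1, by simp [h2]⟩
      · obtain ⟨h1, h2⟩ := ih (piece := piece) (by rw [ht]; simp [hmem]) hc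
        exact ⟨h1, by simp [h2]⟩

lemma pv_splitOnP_congr {p q : Char → Bool} (x : List Char) (h : ∀ c ∈ x, p c = q c) :
    List.splitOnP p x = List.splitOnP q x := by
  induction x with
  | nil => simp
  | cons a as ih =>
    rw [List.splitOnP_cons, List.splitOnP_cons, h a (by simp), ih (fun c hc => h c (by simp [hc]))]

lemma pv_splitOnP_append_delim {p : Char → Bool} {d : Char} (hd : p d = true) (a b : List Char) :
    List.splitOnP p (a ++ d :: b) = List.splitOnP p a ++ List.splitOnP p b := by
  induction a with
  | nil => simp [List.splitOnP_cons, hd]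
  | cons c cs ih =>
    by_cases hc : p c
    · simp [List.splitOnP_cons, hc, ih]
    · simp only [List.cons_append, List.splitOnP_cons, hc, Bool.false_eq_true, if_false, ih]
      obtain ⟨h, t, ht⟩ := List.exists_cons_of_ne_nil (List.splitOnP_ne_nil p cs)
      rw [ht]
      simp

lemma pv_splitOnP_or (p q : Char → Bool) (x : List Char) :
    List.splitOnP (fun c => p c || q c) x = (List.splitOnP p x).flatMap (List.splitOnP q) := by
  induction x with
  | nil => simp
  | cons a as ih =>
    rw [List.splitOnP_cons, List.splitOnP_cons]
    by_cases hp : p a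
    · simp [hp, ih]
    · obtain ⟨h, t, ht⟩ := List.exists_cons_of_ne_nil (List.splitOnP_ne_nil p as)
      rw [ht] at ih ⊢
      by_cases hq : q a
      · simp only [hp, hq, Bool.false_or, if_true, List.modifyHead_cons, List.flatMap_cons, ih]
        simp [List.splitOnP_cons, hq]
      · simp only [hp, hq, Bool.false_or, if_false, Bool.false_eq_true, List.modifyHead_cons,
          List.flatMap_cons, List.splitOnP_cons, ih]
        obtain ⟨h2, t2, ht2⟩ := List.exists_cons_of_ne_nil (List.splitOnP_ne_nil q h)
        rw [ht2]
        simp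

lemma pv_splitOnP_map (p : Char → Bool) (f : Char → Char) (x : List Char) :
    List.splitOnP p (x.map f) = (List.splitOnP (fun c => p (f c)) x).map (List.map f) := by
  induction x with
  | nil => simp
  | cons a as ih =>
    rw [List.map_cons, List.splitOnP_cons, List.splitOnP_cons]
    by_cases hp : p (f a)
    · simp [hp, ih]
    · obtain ⟨h, t, ht⟩ := List.exists_cons_of_ne_nil (List.splitOnP_ne_nil (fun c => p (f c)) as)
      rw [ht] at ih ⊢
      simp [hp, ih]

-- split₀ is the whitespace splitOnP with empty pieces dropped ----------------

lemma pv_split0_go : ∀ (s cur : List Char) (acc : List (List Char)),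
    PySem.Chars.split₀.go s cur acc
      = acc.reverse ++ ((List.splitOnP PySem.Chars.isspace s).modifyHead
          (cur.reverse ++ ·)).filter (fun l => !l.isEmpty) := by
  intro s
  induction s with
  | nil =>
    intro cur acc
    rw [PySem.Chars.split₀.go]
    by_cases h : cur = []
    · subst h; simp
    · simp [List.isEmpty_eq_false_iff.2 h, List.isEmpty_eq_false_iff.2 (by simp [h] : cur.reverse ≠ [])]
  | cons c rest ih =>
    intro cur acc
    rw [PySem.Chars.split₀.go, List.splitOnP_cons]
    by_cases hws : PySem.Chars.isspace c
    · rw [if_pos hws, hws]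
      by_cases hcur : cur = []
      · subst hcur
        simp only [List.isEmpty_nil, if_true, ih]
        obtain ⟨h, t, ht⟩ := List.exists_cons_of_ne_nil (List.splitOnP_ne_nil PySem.Chars.isspace rest)
        rw [ht]
        simp
      · rw [if_neg (by simpa using hcur), ih]
        have h1 : cur.reverse ≠ [] := by simp [hcur]
        obtain ⟨h, t, ht⟩ := List.exists_cons_of_ne_nil (List.splitOnP_ne_nil PySem.Chars.isspace rest)
        rw [ht]
        simp [List.filter_cons, List.isEmpty_eq_false_iff.2 h1]
    · rw [if_neg hws, eq_false_of_ne_true hws, ih]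
      obtain ⟨h, t, ht⟩ := List.exists_cons_of_ne_nil (List.splitOnP_ne_nil PySem.Chars.isspace rest)
      rw [ht]
      simp

lemma pv_split0_eq (s : List Char) :
    PySem.Chars.split₀ s = (List.splitOnP PySem.Chars.isspace s).filter (fun l => !l.isEmpty) := by
  rw [PySem.Chars.split₀, pv_split0_go]
  obtain ⟨h, t, ht⟩ := List.exists_cons_of_ne_nil (List.splitOnP_ne_nil PySem.Chars.isspace s)
  rw [ht]
  simp

-- Chars.splitOn agrees with the structural model ------------------------------

lemma pv_splitOn_go {sep : List Char} (hsep : sep ≠ []) :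
    ∀ (fuel : Nat) (l cur : List Char) (acc : List (List Char)), l.length < fuel →
    PySem.Chars.splitOn.go sep fuel l cur acc
      = acc.reverse ++ (pvSplitOnF sep l).modifyHead (cur.reverse ++ ·) := by
  intro fuel
  induction fuel with
  | zero => intro l cur acc h; omega
  | succ f ih =>
    intro l cur acc h
    cases l with
    | nil =>
      rw [PySem.Chars.splitOn.go]
      · simp [pvSplitOnF]
      · omega
    | cons c rest =>
      rw [PySem.Chars.splitOn.go]
      by_cases hpre : sep.isPrefixOf (c :: rest)
      · rw [if_pos hpre]
        have hlen : sep.length ≤ (c :: rest).length := List.IsPrefix.length_le (List.isPrefixOf_iff_prefix.1 hpre)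
        have h1 : 0 < sep.length := List.length_pos_of_ne_nil hsep
        rw [ih _ _ _ (by simp [List.length_drop] at *; omega)]
        rw [pvSplitOnF, if_pos hpre]
        have : List.drop sep.length (c :: rest) = rest.drop (sep.length - 1) := by
          cases hs : sep with
          | nil => exact absurd hs hsep
          | cons s ss => simp
        rw [this]
        obtain ⟨hh, tt, htt⟩ := List.exists_cons_of_ne_nil (pvSplitOnF_ne_nil sep (rest.drop (sep.length - 1)))
        rw [htt]
        simp
      · rw [if_neg hpre]
        rw [ih _ _ _ (by simp at h ⊢; omega)]
        rw [pvSplitOnF, if_neg hpre]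
        rw [List.modifyHead_modifyHead]
        congr 1
        apply congrFun
        apply congrArg
        funext x
        simp

lemma pv_splitOn_eq {sep : List Char} (hsep : sep ≠ []) (l : List Char) :
    PySem.Chars.splitOn l sep = pvSplitOnF sep l := by
  rw [PySem.Chars.splitOn, pv_splitOn_go hsep _ _ _ _ (by omega)]
  obtain ⟨h, t, ht⟩ := List.exists_cons_of_ne_nil (pvSplitOnF_ne_nil sep l)
  rw [ht]
  simp

lemma pvSplitOnF_single (d : Char) (l : List Char) :
    pvSplitOnF [d] l = List.splitOnP (· == d) l := by
  induction l with
  | nil => simp [pvSplitOnF]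
  | cons c rest ih =>
    rw [pvSplitOnF, List.splitOnP_cons]
    by_cases h : c = d
    · subst h
      simp [List.isPrefixOf, ih]
    · have : ¬ [d].isPrefixOf (c :: rest) := by
        simp [List.isPrefixOf]
        intro hh; exact absurd hh.symm h
      rw [if_neg this, ih]
      simp [beq_false_of_ne h]

-- replace by ' ' is join-of-split --------------------------------------------

lemma pv_replace_go {sep : List Char} (hsep : sep ≠ []) :
    ∀ (fuel : Nat) (l : List Char) (acc : List Char), l.length ≤ fuel →
    PySem.Chars.replace.go sep [' '] fuel l acc
      = acc.reverse ++ PySem.Chars.join [' '] (pvSplitOnF sep l) := by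
  intro fuel
  induction fuel with
  | zero =>
    intro l acc h
    have : l = [] := by cases l; rfl; simp at h
    subst this
    rw [PySem.Chars.replace.go]
    simp [pvSplitOnF, PySem.Chars.join_singleton]
  | succ f ih =>
    intro l acc h
    cases l with
    | nil =>
      rw [PySem.Chars.replace.go]
      · simp [pvSplitOnF, PySem.Chars.join_singleton]
      · omega
    | cons c rest =>
      rw [PySem.Chars.replace.go]
      by_cases hpre : sep.isPrefixOf (c :: rest)
      · rw [if_pos hpre]
        have hlen : sep.length ≤ (c :: rest).length := List.IsPrefix.length_le (List.isPrefixOf_iff_prefix.1 hpre)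
        have h1 : 0 < sep.length := List.length_pos_of_ne_nil hsep
        have hdrop : List.drop sep.length (c :: rest) = rest.drop (sep.length - 1) := by
          cases sep with
          | nil => exact absurd rfl hsep
          | cons s ss => simp
        rw [ih _ _ (by simp [List.length_drop] at *; omega)]
        rw [pvSplitOnF, if_pos hpre, hdrop]
        obtain ⟨hh, tt, htt⟩ := List.exists_cons_of_ne_nil (pvSplitOnF_ne_nil sep (rest.drop (sep.length - 1)))
        rw [htt, PySem.Chars.join_cons_cons]
        simp
      · rw [if_neg hpre]
        rw [ih _ _ (by simp at h ⊢; omega)]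
        rw [pvSplitOnF, if_neg hpre]
        obtain ⟨hh, tt, htt⟩ := List.exists_cons_of_ne_nil (pvSplitOnF_ne_nil sep rest)
        rw [htt]
        cases tt with
        | nil => simp [PySem.Chars.join_singleton]
        | cons t2 ts =>
          rw [List.modifyHead_cons, PySem.Chars.join_cons_cons, PySem.Chars.join_cons_cons]
          simp

lemma pv_replace_eq {sep : List Char} (hsep : sep ≠ []) (l : List Char) :
    PySem.Chars.replace l sep [' '] = PySem.Chars.join [' '] (pvSplitOnF sep l) := by
  rw [PySem.Chars.replace, if_neg (by simp [hsep]), pv_replace_go hsep _ _ _ (by omega)]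
  simp

lemma pv_join_map (l : List Char) :
    PySem.Chars.join [' '] (List.splitOnP (· == '_') l) = l.map pvF := by
  induction l with
  | nil => simp [PySem.Chars.join_singleton]
  | cons c rest ih =>
    rw [List.splitOnP_cons]
    obtain ⟨hh, tt, htt⟩ := List.exists_cons_of_ne_nil (List.splitOnP_ne_nil (· == '_') rest)
    by_cases hc : c = '_'
    · subst hc
      rw [if_pos (by simp), htt, PySem.Chars.join_cons_cons]
      rw [htt] at ih
      simp [pvF, ih]
    · rw [if_neg (by simp [hc]), htt, List.modifyHead_cons]
      rw [htt] at ih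
      cases tt with
      | nil =>
        rw [PySem.Chars.join_singleton]
        rw [PySem.Chars.join_singleton] at ih
        simp [pvF, hc, ih]
      | cons t2 ts =>
        rw [PySem.Chars.join_cons_cons]
        rw [PySem.Chars.join_cons_cons] at ih
        simp only [List.map_cons, pvF, if_neg (by simp [hc] : ¬ (c == '_') = true)]
        rw [← ih]
        simp

-- strip facts -----------------------------------------------------------------

lemma pv_strip_id (l : List Char) (h : ∀ c ∈ l, PySem.Chars.isspace c = false) :
    PySem.Chars.strip l = l := by
  rw [PySem.Chars.strip, PySem.Chars.lstrip, PySem.Chars.rstrip]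
  have h1 : List.dropWhile PySem.Chars.isspace l = l := by
    rw [List.dropWhile_eq_self_iff]
    intro hl
    simp [h _ (List.getElem_mem hl)]
  rw [h1]
  have h2 : List.dropWhile PySem.Chars.isspace l.reverse = l.reverse := by
    rw [List.dropWhile_eq_self_iff]
    intro hl
    have : l.reverse[0] ∈ l.reverse := List.getElem_mem hl
    simpa using h _ (List.mem_reverse.1 this)
  rw [h2]
  simp

lemma pv_filter_splitOnP_dropWhile (p : Char → Bool) (s : List Char) :
    (List.splitOnP p (s.dropWhile p)).filter (fun l => !l.isEmpty)
      = (List.splitOnP p s).filter (fun l => !l.isEmpty) := by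
  induction s with
  | nil => simp
  | cons c rest ih =>
    by_cases hc : p c
    · rw [List.dropWhile_cons_of_pos hc, ih, List.splitOnP_cons, if_pos hc]
      simp
    · rw [List.dropWhile_cons_of_neg hc]

lemma pv_filter_splitOnP_append_delims (p : Char → Bool) (s v : List Char)
    (hv : ∀ c ∈ v, p c = true) :
    (List.splitOnP p (s ++ v)).filter (fun l => !l.isEmpty)
      = (List.splitOnP p s).filter (fun l => !l.isEmpty) := by
  induction v using List.reverseRecOn with
  | nil => simp
  | append_singleton v' d ih =>
    have hd : p d = true := hv d (by simp)
    rw [show s ++ (v' ++ [d]) = (s ++ v') ++ d :: [] by simp]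
    rw [pv_splitOnP_append_delim hd, List.filter_append, ih (fun c hc => hv c (by simp [hc]))]
    simp

lemma pv_split0_strip (t : List Char) :
    PySem.Chars.split₀ (PySem.Chars.strip t) = PySem.Chars.split₀ t := by
  rw [pv_split0_eq, pv_split0_eq]
  rw [PySem.Chars.strip, PySem.Chars.lstrip, PySem.Chars.rstrip]
  set u := List.dropWhile PySem.Chars.isspace t with hu
  have hdecomp : u = (List.dropWhile PySem.Chars.isspace u.reverse).reverse
      ++ (List.takeWhile PySem.Chars.isspace u.reverse).reverse := by
    rw [← List.reverse_append, List.takeWhile_append_dropWhile, List.reverse_reverse]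
  have h1 : (List.splitOnP PySem.Chars.isspace ((List.dropWhile PySem.Chars.isspace u.reverse).reverse)).filter (fun l => !l.isEmpty)
      = (List.splitOnP PySem.Chars.isspace u).filter (fun l => !l.isEmpty) := by
    conv_rhs => rw [hdecomp]
    rw [pv_filter_splitOnP_append_delims _ _ _ ?_]
    intro c hc
    exact List.mem_takeWhile_imp (List.mem_reverse.1 hc)
  rw [h1, hu, pv_filter_splitOnP_dropWhile]

-- tokens distribute over a space-join ----------------------------------------

lemma pv_tok_join (parts : List (List Char)) (h : parts ≠ []) :
    pvTok (PySem.Chars.join [' '] parts) = parts.flatMap pvTok := by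
  induction parts with
  | nil => exact absurd rfl h
  | cons x xs ih =>
    cases xs with
    | nil => simp [PySem.Chars.join_singleton, pvTok]
    | cons y ys =>
      rw [PySem.Chars.join_cons_cons]
      unfold pvTok
      rw [show x ++ [' '] ++ PySem.Chars.join [' '] (y :: ys) = x ++ ' ' :: PySem.Chars.join [' '] (y :: ys) by simp]
      rw [pv_splitOnP_append_delim (by decide : pvP ' ' = true), List.filter_append]
      have := ih (by simp)
      unfold pvTok at this
      rw [this]
      simp

lemma pv_flatMap_filter {α : Type} (l : List (List Char)) (g : List Char → List α) (hg : g [] = []) :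
    (l.filter (fun x => !x.isEmpty)).flatMap g = l.flatMap g := by
  induction l with
  | nil => simp
  | cons x xs ih =>
    by_cases hx : x = []
    · subst hx
      simp [hg, ih]
    · rw [List.filter_cons, if_pos (by simpa using hx)]
      simp [ih]

-- wordMap lookup facts --------------------------------------------------------

lemma pv_get?_some_ne_empty (k : String) (v : String) (h : pvWordMap.get? k = some v) :
    v.toList ≠ [] := by
  have hmem : (k, v) ∈ pvWordMap.items := PySem.Dict.mem_items_of_get?_eq_some pvWordMap h
  have hit : pvWordMap.items = [("@fps@","i"),("@fps@$","my"),("@fpp@","we"),("@fpp@$","our"),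
    ("@sp@","you"),("@sp@$","your"),("@tpm@","he"),("@tpm@$","his"),
    ("@tpf@","she"),("@tpf@$","her"),("@tpp@","they"),("@tpp@$","their")] := by rfl
  rw [hit] at hmem
  simp only [List.mem_cons, List.not_mem_nil, or_false, Prod.mk.injEq] at hmem
  rcases hmem with ⟨-, rfl⟩|⟨-, rfl⟩|⟨-, rfl⟩|⟨-, rfl⟩|⟨-, rfl⟩|⟨-, rfl⟩|⟨-, rfl⟩|⟨-, rfl⟩|⟨-, rfl⟩|⟨-, rfl⟩|⟨-, rfl⟩|⟨-, rfl⟩ <;> decide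

lemma pv_lk_len (w : List Char) : (0 < PySem.Str.len (pvLk w)) ↔ w ≠ [] := by
  rw [PySem.Str.len_eq]
  unfold pvLk
  cases w with
  | nil =>
    rw [(by decide : pvWordMap.get? (String.ofList []) = none)]
    simp
  | cons c cs =>
    cases hg : pvWordMap.get? (String.ofList (c :: cs)) with
    | some v =>
      have hne := pv_get?_some_ne_empty _ _ hg
      simp only [Option.getD_some]
      constructor
      · intro _; simp
      · intro _
        have : v.toList.length ≠ 0 := by simpa [List.length_eq_zero_iff] using hne
        omega
    | none =>
      simp [String.toList_ofList]

-- assembling A ---------------------------------------------------------------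

lemma pv_foldl_lk (l : List (List Char)) (words : List String) :
    l.foldl (fun ws w => if 0 < PySem.Str.len (pvLk w) then ws ++ [pvLk w] else ws) words
      = words ++ (l.filter (fun w => !w.isEmpty)).map pvLk := by
  induction l generalizing words with
  | nil => simp
  | cons x xs ih =>
    rw [List.foldl_cons]
    by_cases hx : x = []
    · subst hx
      rw [if_neg (by simp), ih]
      simp
    · rw [if_pos ((pv_lk_len x).2 hx), ih, List.filter_cons, if_pos (by simpa using hx)]
      simp

lemma pv_inner (item : List Char) (words : List String)
    (hitem : ∀ c ∈ item, PySem.Chars.isspace c = false) :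
    (PySem.Chars.splitOn item ['_']).foldl (fun words w =>
        let w1 := PySem.Chars.strip w
        let w2 : String := match pvWordMap.get? (String.ofList w1) with
          | some v => v
          | none => String.ofList w1
        if 0 < PySem.Str.len w2 then words ++ [w2] else words) words
      = words ++ (pvTok item).map pvLk := by
  rw [pv_splitOn_eq (by simp) item, pvSplitOnF_single]
  rw [PySem.List.foldl_congr_mem _ _
    (fun ws w => if 0 < PySem.Str.len (pvLk w) then ws ++ [pvLk w] else ws) _ ?_]
  · rw [pv_foldl_lk]
    unfold pvTok
    rw [pv_splitOnP_congr item (q := pvP) ?_]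
    intro c hc
    simp [pvP, hitem c hc]
  · intro acc w hw
    have hstrip : PySem.Chars.strip w = w :=
      pv_strip_id w (fun c hc => (pv_mem_splitOnP hw hc).1.symm ▸ hitem c (pv_mem_splitOnP hw hc).2)
    simp only [hstrip]
    cases hg : pvWordMap.get? (String.ofList w) <;> simp [pvLk, hg]

lemma pv_mid (t : List Char) (words : List String) :
    (PySem.Chars.split₀ (PySem.Chars.strip t)).foldl (fun words item =>
        let item1 := PySem.Chars.strip item
        let wlist := PySem.Chars.splitOn item1 ['_']
        wlist.foldl (fun words w =>
          let w1 := PySem.Chars.strip w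
          let w2 : String := match pvWordMap.get? (String.ofList w1) with
            | some v => v
            | none => String.ofList w1
          if 0 < PySem.Str.len w2 then words ++ [w2] else words) words) words
      = words ++ (pvTok t).map pvLk := by
  rw [pv_split0_strip, pv_split0_eq]
  rw [PySem.List.foldl_congr_mem _ _
    (fun acc item => acc ++ (pvTok item).map pvLk) _ ?_]
  · rw [PySem.List.foldl_append_eq_flatMap]
    rw [pv_flatMap_filter _ _ (by decide)]
    congr 1
    rw [← List.map_flatMap]
    congr 1
    unfold pvTok
    rw [← List.filter_flatMap, ← pv_splitOnP_or]
    rw [pv_splitOnP_congr (p := fun c => PySem.Chars.isspace c || pvP c) (q := pvP) t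
      (fun c _ => by unfold pvP; cases h : PySem.Chars.isspace c <;> simp [h])]
  · intro acc item hitem
    have hmem := List.mem_filter.1 hitem
    have hns : ∀ c ∈ item, PySem.Chars.isspace c = false :=
      fun c hc => (pv_mem_splitOnP hmem.1 hc).1
    simp only [pv_strip_id item hns]
    exact pv_inner item acc hns

lemma pv_A_eq (ev : String) :
    get_event_words ev = ((pvSplitOnF ['=','=','='] ev.toList).flatMap pvTok).map pvLk := by
  show (PySem.Chars.splitOn ev.toList ['=','=','=']).foldl _ [] = _
  rw [pv_splitOn_eq (by simp)]
  rw [PySem.List.foldl_congr_mem _ _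
    (fun acc t => acc ++ (pvTok t).map pvLk) _ (fun acc t _ => pv_mid t acc)]
  rw [PySem.List.foldl_append_eq_flatMap, ← List.map_flatMap]
  simp

-- assembling B ---------------------------------------------------------------

lemma pv_B_eq (ev : String) :
    get_event_words_alt ev = ((pvSplitOnF ['=','=','='] ev.toList).flatMap pvTok).map pvLk := by
  show (PySem.Chars.split₀ (PySem.Chars.replace (PySem.Chars.replace ev.toList ['=','=','='] [' ']) ['_'] [' '])).map _ = _
  have hmapfn : (fun tok => (pvWordMap.get? (String.ofList tok)).getD (String.ofList tok)) = pvLk := rfl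
  rw [hmapfn]
  congr 1
  rw [pv_replace_eq (by simp), pvSplitOnF_single, pv_join_map]
  rw [pv_split0_eq, pv_splitOnP_map]
  have hP : (fun c => PySem.Chars.isspace (pvF c)) = pvP := by
    funext c
    unfold pvF pvP
    by_cases h : c = '_'
    · subst h; decide
    · simp [beq_false_of_ne h]
  rw [hP]
  have hid : (List.splitOnP pvP (PySem.Chars.replace ev.toList ['=','=','='] [' '])).map (List.map pvF)
      = List.splitOnP pvP (PySem.Chars.replace ev.toList ['=','=','='] [' ']) := by
    conv_rhs => rw [← List.map_id (List.splitOnP pvP (PySem.Chars.replace ev.toList ['=','=','='] [' ']))]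
    apply List.map_congr_left
    intro piece hpiece
    have : ∀ c ∈ piece, pvF c = c := by
      intro c hc
      have hcp := (pv_mem_splitOnP hpiece hc).1
      unfold pvP at hcp
      unfold pvF
      simp at hcp
      simp [hcp.2]
    simp only [id]
    rw [List.map_congr_left this]
    simp
  rw [hid]
  have : (List.splitOnP pvP (PySem.Chars.replace ev.toList ['=','=','='] [' '])).filter (fun l => !l.isEmpty)
      = pvTok (PySem.Chars.replace ev.toList ['=','=','='] [' ']) := rfl
  rw [this, pv_replace_eq (by simp), pv_tok_join _ (pvSplitOnF_ne_nil _ _)]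

-- ===== VERDICT (by name: the statement is the Claim_ definition above) =====
theorem get_event_words_spec : Claim_equal_get_event_words := by
  intro ev _
  unfold Spec_get_event_words
  rw [pv_A_eq, pv_B_eq]
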